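-- pv_equiv track=rewrite | github.com/LincolnRick/poke-market-br | scrapers/pricecharting.py | _guess_set_from_url
-- ===== SOURCE A (Python) =====
-- def _guess_set_from_url(item_url: str) -> str:
--     # .../game/pokemon-evolving-skies/dragonite-v-192 -> "pokemon-evolving-skies"
--     try:
--         parts = [p for p in item_url.split("/") if p]
--         game_idx = parts.index("game")
--         raw = parts[game_idx + 1]
--         return raw.replace("-", " ").title()
--     except Exception:
--         return ""
-- ===== SOURCE B (Python) =====
-- def _guess_set_from_url(item_url: str) -> str:
--     # Substring search on the slash-padded URL instead of tokenizing: a "game"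
--     # path segment occurs in "/"+url+"/" exactly as the substring "/game/".
--     padded = "/" + item_url + "/"
--     i = padded.find("/game/")
--     if i == -1:
--         return ""
--     seg = padded[i + 6:].lstrip("/").partition("/")[0]
--     return seg.replace("-", " ").title()
-- ===== Notes on version B (the rewrite author's own statement) =====
-- stated objective: alternative
-- what changed: Replaces A's tokenize-filter-index pipeline (split('/'), drop empties, list.index('game'), indexed lookup, try/except) with a substring search: a 'game' path segment occurs in the slash-padded string '/'+url+'/' exactly as the substring '/game/', so B finds that pattern once and slices out the following nonempty run of non-slash characters.
import Mathlib
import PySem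

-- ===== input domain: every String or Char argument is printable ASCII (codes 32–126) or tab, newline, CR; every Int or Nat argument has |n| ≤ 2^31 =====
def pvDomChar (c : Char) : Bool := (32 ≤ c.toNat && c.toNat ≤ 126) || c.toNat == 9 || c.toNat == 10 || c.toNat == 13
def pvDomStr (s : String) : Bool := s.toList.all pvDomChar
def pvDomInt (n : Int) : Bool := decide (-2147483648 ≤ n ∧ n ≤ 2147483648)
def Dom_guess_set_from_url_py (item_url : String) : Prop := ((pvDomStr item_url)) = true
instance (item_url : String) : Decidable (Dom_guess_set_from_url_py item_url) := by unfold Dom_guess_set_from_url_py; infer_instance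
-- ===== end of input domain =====

-- B replaces A's split/filter/.index/indexed-lookup tokenizing with a substring search on the
-- slash-padded URL ("/"+url+"/").find("/game/") followed by string slicing (objective: alternative).

-- hand port of Python's str.title(), exact on the ASCII domain (where the cased characters
-- are exactly the letters): a letter is uppercased when the previous character is not a
-- letter, lowercased otherwise; other characters pass through.  Shared by both ports
-- (both Pythons end with .replace('-',' ').title()).
def pyTitleAux : Bool → List Char → List Char
  | _, [] => []
  | prevAlpha, c :: cs =>
    (if PySem.Chars.isalpha c then
        (if prevAlpha then PySem.Chars.lowerChar c else PySem.Chars.upperChar c)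
      else c) :: pyTitleAux (PySem.Chars.isalpha c) cs

def pyTitle (s : String) : String := String.ofList (pyTitleAux false s.toList)

-- ===== PORT A =====
def guess_set_from_url_py (item_url : String) : String :=
  let parts := ((PySem.Str.split? item_url "/").getD []).filter (fun p => p ≠ "")
  match PySem.List.index? parts "game" with
  | none => ""            -- ValueError caught by the except
  | some game_idx =>
    match PySem.List.pyGet? parts ((game_idx : Int) + 1) with
    | none => ""          -- IndexError caught by the except
    | some raw => pyTitle (PySem.Str.replace raw "-" " ")

-- ===== PORT B =====
def guess_set_from_url_py_alt (item_url : String) : String :=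
  -- padded = "/" + item_url + "/"  (kept on List Char: Lean's String.append is opaque)
  let padded : List Char := '/' :: item_url.toList ++ ['/']
  -- i = padded.find("/game/")
  let i := PySem.Chars.find padded "/game/".toList
  if i = -1 then ""
  else
    -- padded[i + 6:]
    let tail := PySem.List.slice padded (some (i + 6)) none
    -- .lstrip("/") : drop the leading run of '/' characters (exact for this 1-char strip set)
    let t2 := tail.dropWhile (fun c => c == '/')
    -- .partition("/")[0] : the part before the first '/', the whole string if none (exact for a 1-char separator)
    let seg := t2.takeWhile (fun c => c != '/')
    -- seg.replace("-", " ").title()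
    String.ofList (pyTitleAux false (PySem.Chars.replace seg "-".toList " ".toList))

-- ===== PRECONDITION & SPEC =====
def Spec_guess_set_from_url_py (item_url : String) (out : String) : Prop := out = guess_set_from_url_py_alt item_url
instance (item_url : String) (out : String) : Decidable (Spec_guess_set_from_url_py item_url out) := by unfold Spec_guess_set_from_url_py; infer_instance

-- ===== CLAIM (what is proved, stated in full; the proofs are below) =====
def Claim_equal_guess_set_from_url_py : Prop := ∀ (item_url : String), Dom_guess_set_from_url_py item_url → Spec_guess_set_from_url_py item_url (guess_set_from_url_py item_url)

-- ===== LEMMAS AND PROOFS =====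

-- abbreviations used by the proofs only
def patC : List Char := "/game/".toList          -- the search pattern
def gameC : List Char := "game".toList           -- the marker segment

-- B's tail extraction (what the port does after the find succeeded), on a plain list
def bTail (x : List Char) : String :=
  String.ofList (pyTitleAux false (PySem.Chars.replace
    ((x.dropWhile (fun c => c == '/')).takeWhile (fun c => c != '/')) "-".toList " ".toList))

-- B's whole body as a function of the padded character list
def bCore (p : List Char) : String :=
  if PySem.Chars.find p patC = -1 then "" else bTail (List.drop (PySem.Chars.find p patC + 6).toNat p)

-- A's tokenization, as the obvious structural split on '/'
def mySplit : List Char → List Char → List (List Char)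
  | [], cur => [cur.reverse]
  | '/' :: t, cur => cur.reverse :: mySplit t []
  | c :: t, cur => mySplit t (c :: cur)

-- the inverse of mySplit: glue segments with '/' and pad both ends
def padJoin (L : List (List Char)) : List Char :=
  L.foldr (fun s acc => '/' :: s ++ acc) ['/']

-- the flag-scan both sides are reduced to, at the String level (matching A's pieces) …
def scanS : List String → Bool → String
  | [], _ => ""
  | seg :: rest, seen =>
    if seg = "" then scanS rest seen
    else if seen then pyTitle (PySem.Str.replace seg "-" " ")
    else if seg = "game" then scanS rest true
    else scanS rest seen

-- … and at the List Char level (matching B's slices)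
def scanC : List (List Char) → Bool → String
  | [], _ => ""
  | seg :: rest, seen =>
    if seg = [] then scanC rest seen
    else if seen then
      String.ofList (pyTitleAux false (PySem.Chars.replace seg "-".toList " ".toList))
    else if seg = gameC then scanC rest true
    else scanC rest seen

-- segments produced by mySplit are slash-free
theorem mySplit_noslash (l cur : List Char) (hc : '/' ∉ cur) :
    ∀ s ∈ mySplit l cur, '/' ∉ s := by
  induction l generalizing cur with
  | nil => simpa [mySplit] using hc
  | cons c t ih =>
    by_cases h : c = '/'
    · subst h
      intro s hs
      have hs' : s = cur.reverse ∨ s ∈ mySplit t [] := by simpa [mySplit] using hs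
      rcases hs' with h | h
      · subst h; simpa using hc
      · exact ih [] (by simp) s h
    · intro s hs
      rw [show mySplit (c :: t) cur = mySplit t (c :: cur) by
        cases hc2 : c <;> simp_all [mySplit]] at hs
      exact ih (c :: cur) (by simp [hc, Ne.symm h]) s hs

-- padJoin undoes mySplit
theorem padJoin_mySplit (l cur : List Char) :
    padJoin (mySplit l cur) = '/' :: (cur.reverse ++ l ++ ['/']) := by
  induction l generalizing cur with
  | nil => simp [mySplit, padJoin]
  | cons c t ih =>
    by_cases h : c = '/'
    · subst h
      show padJoin (cur.reverse :: mySplit t []) = _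
      simp only [padJoin, List.foldr_cons]
      rw [show (mySplit t []).foldr (fun s acc => '/' :: s ++ acc) ['/'] = padJoin (mySplit t []) from rfl, ih]
      simp
    · rw [show mySplit (c :: t) cur = mySplit t (c :: cur) by
        cases hc2 : c <;> simp_all [mySplit], ih]
      simp

-- PySem's splitOn on '/' is mySplit
theorem splitOn_go_eq (fuel : Nat) : ∀ (l cur : List Char) (acc : List (List Char)),
    l.length < fuel →
    PySem.Chars.splitOn.go ['/'] fuel l cur acc = acc.reverse ++ mySplit l cur := by
  induction fuel with
  | zero => intro l cur acc h; omega
  | succ fuel ih =>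
    intro l cur acc h
    match l with
    | [] => simp [PySem.Chars.splitOn.go, mySplit]
    | c :: rest =>
      by_cases hc : c = '/'
      · subst hc
        rw [show PySem.Chars.splitOn.go ['/'] (fuel+1) ('/' :: rest) cur acc
              = PySem.Chars.splitOn.go ['/'] fuel rest [] (cur.reverse :: acc) by
            simp [PySem.Chars.splitOn.go, List.isPrefixOf]]
        rw [ih rest [] (cur.reverse :: acc) (by simpa using Nat.lt_of_succ_lt_succ h)]
        simp [mySplit]
      · rw [show PySem.Chars.splitOn.go ['/'] (fuel+1) (c :: rest) cur acc
              = PySem.Chars.splitOn.go ['/'] fuel rest (c :: cur) acc by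
            simp [PySem.Chars.splitOn.go, List.isPrefixOf, Ne.symm hc]]
        rw [ih rest (c :: cur) acc (by simpa using Nat.lt_of_succ_lt_succ h)]
        congr 1
        cases hc2 : c <;> simp_all [mySplit]

theorem splitOn_eq_mySplit (s : List Char) :
    PySem.Chars.splitOn s ['/'] = mySplit s [] := by
  rw [show PySem.Chars.splitOn s ['/'] = PySem.Chars.splitOn.go ['/'] (s.length + 1) s [] [] from rfl]
  rw [splitOn_go_eq (s.length + 1) s [] [] (by omega)]
  simp

-- ---------- A-side: A = scanS over its split pieces ----------

theorem scanS_filter (l : List String) (b : Bool) :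
    scanS l b = scanS (l.filter (fun p => p ≠ "")) b := by
  induction l generalizing b with
  | nil => rfl
  | cons s rest ih =>
    by_cases hs : s = "" <;> simp [scanS, hs, ih]

theorem scanS_true (l : List String) (h : "" ∉ l) :
    scanS l true = match l.head? with
      | none => ""
      | some raw => pyTitle (PySem.Str.replace raw "-" " ") := by
  cases l with
  | nil => rfl
  | cons s rest =>
    simp at h
    simp [scanS, h.1]

theorem scanS_eq_index (l : List String) (h : "" ∉ l) :
    scanS l false = (match PySem.List.index? l "game" with
      | none => ""
      | some game_idx =>
        match PySem.List.pyGet? l ((game_idx : Int) + 1) with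
        | none => ""
        | some raw => pyTitle (PySem.Str.replace raw "-" " ")) := by
  induction l with
  | nil => rfl
  | cons s rest ih =>
    simp at h
    by_cases hg : s = "game"
    · subst hg
      rw [PySem.List.index?_cons_self]
      have hget : PySem.List.pyGet? ("game" :: rest) (((0:Nat) : Int) + 1)
          = rest[(0:Nat)]? := by
        rw [PySem.List.pyGet?_cons_succ, PySem.List.pyGet?_natCast]
      simp only [hget, scanS, reduceIte, h.1]
      rw [scanS_true rest h.2]
      cases rest <;> simp
    · have hidx : PySem.List.index? (s :: rest) "game"
          = (PySem.List.index? rest "game").map (· + 1) := by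
        simp [PySem.List.index?_eq_idxOf?, List.idxOf?_cons, hg]
      rw [hidx]
      have hscan : scanS (s :: rest) false = scanS rest false := by
        simp [scanS, h.1, hg]
      rw [hscan, ih h.2]
      cases hrec : PySem.List.index? rest "game" with
      | none => simp
      | some i =>
        simp only [Option.map_some]
        rw [PySem.List.pyGet?_cons_succ]
        push_cast
        rfl

theorem A_eq_scanS (u : String) :
    guess_set_from_url_py u = scanS ((PySem.Str.split? u "/").getD []) false := by
  unfold guess_set_from_url_py
  rw [scanS_filter]
  exact (scanS_eq_index _ (by simp)).symm

theorem split?_parts (u : String) :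
    (PySem.Str.split? u "/").getD [] = (mySplit u.toList []).map String.ofList := by
  rw [PySem.Str.split?.eq_1]
  rw [show PySem.Chars.split? u.toList "/".toList
        = some (PySem.Chars.splitOn u.toList ['/']) by simp [PySem.Chars.split?.eq_1]]
  rw [splitOn_eq_mySplit]
  rfl

theorem scanS_map (L : List (List Char)) (b : Bool) :
    scanS (L.map String.ofList) b = scanC L b := by
  induction L generalizing b with
  | nil => rfl
  | cons s rest ih =>
    have hinj : ∀ (a b : List Char), String.ofList a = String.ofList b → a = b := by
      intro a b h; have := congrArg String.toList h; simpa using this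
    have hempty : (String.ofList s = "") ↔ s = [] := by
      constructor
      · intro h; simpa using hinj s [] (by simpa using h)
      · intro h; subst h; rfl
    have hgame : (String.ofList s = "game") ↔ s = gameC := by
      constructor
      · intro h; exact hinj s gameC (by simpa [gameC] using h)
      · intro h; subst h; rfl
    by_cases hs : s = []
    · subst hs; simp [scanS, scanC, ih]
    · by_cases hb : b
      · subst hb
        have : pyTitle (PySem.Str.replace (String.ofList s) "-" " ")
            = String.ofList (pyTitleAux false (PySem.Chars.replace s "-".toList " ".toList)) := by
          unfold pyTitle
          congr 1
          congr 1
          simp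
        simp [scanS, scanC, hempty, hs, this]
      · simp only [Bool.not_eq_true] at hb; subst hb
        by_cases hg : s = gameC
        · subst hg
          simp [scanS, scanC, ih, show String.ofList gameC = "game" from rfl,
            show gameC ≠ [] by decide]
        · simp [scanS, scanC, hempty, hs, hgame, hg, ih]

-- ---------- B-side: bCore over the padded join = scanC ----------

-- where the first occurrence of "/game/" is: never inside or at a non-"game" leading segment
theorem no_occ_head (s Y : List Char) (hs : '/' ∉ s) (hne : s ≠ gameC)
    (p : Nat) (hp : p ≤ s.length) :
    ¬ patC <+: (('/' :: s) ++ '/' :: Y).drop p := by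
  intro hpre
  have h6 : patC.length = 6 := rfl
  have hdlen := hpre.length_le
  have hwlen : (('/' :: s) ++ '/' :: Y).length = s.length + Y.length + 2 := by
    simp; omega
  have hplen : p + 6 ≤ s.length + Y.length + 2 := by
    rw [List.length_drop, hwlen] at hdlen
    omega
  have hk : ∀ k, k < 6 → (('/' :: s) ++ '/' :: Y)[p+k]? = patC[k]? := by
    intro k hk6
    have hlt : p + k < (('/' :: s) ++ '/' :: Y).length := by rw [hwlen]; omega
    have h := hpre.getElem (i := k) (by omega)
    rw [List.getElem_drop] at h
    rw [List.getElem?_eq_getElem hlt, List.getElem?_eq_getElem (by omega), h]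
  have hw_mid : (('/' :: s) ++ '/' :: Y)[s.length+1]? = some '/' := by
    rw [List.getElem?_append_right (by simp)]
    simp
  have hw_s : ∀ i, i < s.length → (('/' :: s) ++ '/' :: Y)[i+1]? = s[i]? := by
    intro i hi
    rw [show ('/' :: s) ++ '/' :: Y = '/' :: (s ++ '/' :: Y) from rfl,
      List.getElem?_cons_succ, List.getElem?_append_left hi]
  rcases Nat.eq_zero_or_pos p with hp0 | hp1
  · subst hp0
    simp only [Nat.zero_add] at hk
    rcases lt_trichotomy s.length 4 with hl | hl | hl
    · -- short s: padded[s.length+1] = '/' but patC[s.length+1] is a letter of "game"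
      have hpat : ∀ k, 1 ≤ k → k ≤ 4 → patC[k]? ≠ some '/' := by
        intro k h1 h2
        interval_cases k <;> decide
      exact hpat (s.length+1) (by omega) (by omega) ((hk (s.length+1) (by omega)).symm.trans hw_mid)
    · -- s.length = 4 forces s = "game"
      apply hne
      apply List.ext_getElem?
      intro i
      by_cases hi : i < 4
      · have h1 : s[i]? = patC[i+1]? := (hw_s i (by omega)).symm.trans (hk (i+1) (by omega))
        rw [h1]
        interval_cases i <;> decide
      · rw [List.getElem?_eq_none (by omega), List.getElem?_eq_none (by simp [gameC]; omega)]
    · -- long s: padded[5] = s[4] = '/' would put '/' into s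
      apply hs
      have h1 : s[4]? = some '/' := by
        have h2 := (hw_s 4 (by omega)).symm.trans (hk 5 (by omega))
        rw [h2]
        decide
      exact List.mem_of_getElem? h1
  · -- p ≥ 1 : padded[p] is a character of s, but patC[0] = '/'
    apply hs
    have h1 := hk 0 (by omega)
    rw [show p + 0 = (p-1)+1 by omega, hw_s (p-1) (by omega)] at h1
    exact List.mem_of_getElem? (by rw [h1]; rfl)


-- find localizes: a computed first occurrence pins Chars.find
theorem find_eq_of (w sub : List Char) (n : Nat) (h1 : sub <+: w.drop n)
    (h0 : ∀ i < n, ¬ sub <+: w.drop i) : PySem.Chars.find w sub = n := by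
  have hin : PySem.Chars.isIn sub w = true :=
    (PySem.Chars.exists_prefix_drop_iff_isIn sub w).1 ⟨n, h1⟩
  have hge : 0 ≤ PySem.Chars.find w sub :=
    (PySem.Chars.find_nonneg_iff w sub).2 ((PySem.Chars.isIn_iff_infix sub w).1 hin)
  obtain ⟨hpre, hmin⟩ := PySem.Chars.find_spec hge
  have hn : (PySem.Chars.find w sub).toNat = n := by
    rcases Nat.lt_trichotomy (PySem.Chars.find w sub).toNat n with h | h | h
    · exact absurd hpre (h0 _ h)
    · exact h
    · exact absurd h1 (hmin n h)
  omega

theorem find_shift (s Y : List Char) (hs : '/' ∉ s) (hne : s ≠ gameC) :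
    PySem.Chars.find (('/' :: s) ++ '/' :: Y) patC =
      if PySem.Chars.find ('/' :: Y) patC = -1 then -1
      else (s.length + 1 : Int) + PySem.Chars.find ('/' :: Y) patC := by
  have hdrop : ∀ k : Nat, (('/' :: s) ++ '/' :: Y).drop (s.length + 1 + k) = ('/' :: Y).drop k := by
    intro k
    have := List.drop_length_add_append (l₁ := '/' :: s) (l₂ := '/' :: Y) k
    simpa using this
  by_cases h : PySem.Chars.find ('/' :: Y) patC = -1
  · rw [if_pos h]
    rw [PySem.Chars.find_eq_neg_one_iff]
    intro hinf
    obtain ⟨j, hj⟩ := (PySem.Chars.exists_prefix_drop_iff_isIn patC _).2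
      ((PySem.Chars.isIn_iff_infix patC _).2 hinf)
    by_cases hjs : j ≤ s.length
    · exact no_occ_head s Y hs hne j hjs hj
    · have hj' : patC <+: ('/' :: Y).drop (j - (s.length + 1)) := by
        rw [← hdrop (j - (s.length + 1)), show s.length + 1 + (j - (s.length + 1)) = j by omega]
        exact hj
      have : PySem.Chars.isIn patC ('/' :: Y) = true :=
        (PySem.Chars.exists_prefix_drop_iff_isIn patC _).1 ⟨_, hj'⟩
      rw [PySem.Chars.find_eq_neg_one_iff] at h
      exact h ((PySem.Chars.isIn_iff_infix patC _).1 this)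
  · rw [if_neg h]
    have hge : 0 ≤ PySem.Chars.find ('/' :: Y) patC := by
      have := PySem.Chars.neg_one_le_find ('/' :: Y) patC
      omega
    obtain ⟨hpre, hmin⟩ := PySem.Chars.find_spec hge
    have heq : PySem.Chars.find (('/' :: s) ++ '/' :: Y) patC
        = ((s.length + 1 + (PySem.Chars.find ('/' :: Y) patC).toNat : Nat) : Int) := by
      apply find_eq_of
      · rw [hdrop]; exact hpre
      · intro i hi
        by_cases his : i ≤ s.length
        · exact no_occ_head s Y hs hne i his
        · intro hcon
          have hk : i - (s.length + 1) < (PySem.Chars.find ('/' :: Y) patC).toNat := by omega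
          apply hmin _ hk
          rw [← hdrop (i - (s.length + 1)), show s.length + 1 + (i - (s.length + 1)) = i by omega]
          exact hcon
    rw [heq]
    push_cast
    rw [Int.toNat_of_nonneg hge]


theorem find_game (Y : List Char) :
    PySem.Chars.find (('/' :: gameC) ++ '/' :: Y) patC = 0 := by
  have : PySem.Chars.find (('/' :: gameC) ++ '/' :: Y) patC = (0 : Nat) :=
    find_eq_of _ _ 0 ⟨Y, rfl⟩ (by omega)
  simpa using this


-- the tail extraction reads off the first nonempty segment
theorem padJoin_cons_head (L : List (List Char)) : ∃ X, padJoin L = '/' :: X := by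
  cases L with
  | nil => exact ⟨[], rfl⟩
  | cons s r => exact ⟨s ++ padJoin r, rfl⟩

theorem bTail_eq_scanC_true (R : List (List Char)) (hSF : ∀ s ∈ R, '/' ∉ s) :
    bTail ((padJoin R).drop 1) = scanC R true := by
  induction R with
  | nil => rfl
  | cons s r ih =>
    have hsf : '/' ∉ s := hSF s (by simp)
    have hr : ∀ t ∈ r, '/' ∉ t := fun t ht => hSF t (by simp [ht])
    have hdrop : (padJoin (s :: r)).drop 1 = s ++ padJoin r := rfl
    by_cases hse : s = []
    · subst hse
      obtain ⟨X, hX⟩ := padJoin_cons_head r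
      have : bTail ((padJoin ([] :: r)).drop 1) = bTail ((padJoin r).drop 1) := by
        rw [hdrop, hX]
        unfold bTail
        simp
      rw [this, ih hr]
      simp [scanC]
    · obtain ⟨c, t, hct⟩ := List.exists_cons_of_ne_nil hse
      have hc : c ≠ '/' := by intro h; subst h; exact hsf (by simp [hct])
      obtain ⟨X, hX⟩ := padJoin_cons_head r
      have hdw : ((s ++ padJoin r).dropWhile (fun c => c == '/')) = s ++ padJoin r := by
        rw [hct]
        simp [hc]
      have htw : ((s ++ padJoin r).takeWhile (fun c => c != '/')) = s := by
        rw [List.takeWhile_append]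
        have hall : List.takeWhile (fun c => c != '/') s = s := by
          apply List.takeWhile_eq_self_iff.2
          intro a ha
          simp only [bne_iff_ne, ne_eq]
          intro h
          exact hsf (h ▸ ha)
        rw [hall, hX]
        simp
      rw [show scanC (s :: r) true
          = String.ofList (pyTitleAux false (PySem.Chars.replace s "-".toList " ".toList)) by
        simp [scanC, hse]]
      unfold bTail
      rw [hdrop, hdw, htw]


theorem bCore_padJoin (L : List (List Char)) (hSF : ∀ s ∈ L, '/' ∉ s) :
    bCore (padJoin L) = scanC L false := by
  induction L with
  | nil =>
    show bCore ['/'] = ""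
    rw [show bCore ['/'] = if PySem.Chars.find ['/'] patC = -1 then ""
        else bTail (List.drop (PySem.Chars.find ['/'] patC + 6).toNat ['/']) from rfl]
    rw [if_pos (by decide)]
  | cons s r ih =>
    have hsf : '/' ∉ s := hSF s (by simp)
    have hr : ∀ t ∈ r, '/' ∉ t := fun t ht => hSF t (by simp [ht])
    obtain ⟨X, hX⟩ := padJoin_cons_head r
    have hpj : padJoin (s :: r) = ('/' :: s) ++ '/' :: X := by
      show '/' :: s ++ padJoin r = _
      rw [hX]
    by_cases hg : s = gameC
    · subst hg
      have hfind : PySem.Chars.find (padJoin (gameC :: r)) patC = 0 := by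
        rw [hpj]; exact find_game X
      unfold bCore
      rw [hfind, if_neg (by omega)]
      have hdrop : List.drop ((0:Int) + 6).toNat (padJoin (gameC :: r)) = X := by
        rw [hpj]; rfl
      rw [hdrop]
      have hX1 : X = (padJoin r).drop 1 := by rw [hX]; rfl
      rw [hX1, bTail_eq_scanC_true r hr]
      simp [scanC, gameC]
    · have hfind : PySem.Chars.find (padJoin (s :: r)) patC =
          if PySem.Chars.find ('/' :: X) patC = -1 then -1
          else (s.length + 1 : Int) + PySem.Chars.find ('/' :: X) patC := by
        rw [hpj]; exact find_shift s X hsf hg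
      have hXpj : padJoin r = '/' :: X := hX
      have hscan : scanC (s :: r) false = scanC r false := by
        by_cases hse : s = []
        · subst hse; simp [scanC]
        · simp [scanC, hse, hg]
      rw [hscan, ← ih hr, hXpj]
      by_cases hf : PySem.Chars.find ('/' :: X) patC = -1
      · unfold bCore
        rw [hfind, if_pos hf, if_pos rfl, if_pos hf]
      · have hge : 0 ≤ PySem.Chars.find ('/' :: X) patC := by
          have := PySem.Chars.neg_one_le_find ('/' :: X) patC
          omega
        have hne2 : ¬ ((s.length + 1 : Int) + PySem.Chars.find ('/' :: X) patC = -1) := by omega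
        have hdrop2 : List.drop (((s.length + 1 : Int) + PySem.Chars.find ('/' :: X) patC + 6)).toNat (padJoin (s :: r))
            = List.drop (PySem.Chars.find ('/' :: X) patC + 6).toNat ('/' :: X) := by
          rw [hpj]
          rw [show (((s.length + 1 : Int) + PySem.Chars.find ('/' :: X) patC + 6)).toNat
              = ('/' :: s).length + (PySem.Chars.find ('/' :: X) patC + 6).toNat by
            simp; omega]
          exact List.drop_length_add_append _
        unfold bCore
        rw [hfind, if_neg hf, if_neg hne2, hdrop2, if_neg hf]


theorem alt_eq_bCore (u : String) :
    guess_set_from_url_py_alt u = bCore ('/' :: u.toList ++ ['/']) := by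
  unfold guess_set_from_url_py_alt bCore bTail patC
  dsimp only
  by_cases h : PySem.Chars.find ('/' :: u.toList ++ ['/']) "/game/".toList = -1
  · rw [if_pos h, if_pos h]
  · have hge : -1 ≤ PySem.Chars.find ('/' :: u.toList ++ ['/']) "/game/".toList :=
      PySem.Chars.neg_one_le_find _ _
    rw [if_neg h, if_neg h, PySem.List.slice_from _ (show (0:Int) ≤ _ + 6 by omega)]

-- ===== VERDICT (by name: the statement is the Claim_ definition above) =====
theorem guess_set_from_url_py_spec : Claim_equal_guess_set_from_url_py := by
  intro u _
  unfold Spec_guess_set_from_url_py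
  have hSF := mySplit_noslash u.toList [] (by simp)
  calc guess_set_from_url_py u
      = scanS ((PySem.Str.split? u "/").getD []) false := A_eq_scanS u
    _ = scanC (mySplit u.toList []) false := by rw [split?_parts, scanS_map]
    _ = bCore (padJoin (mySplit u.toList [])) := (bCore_padJoin _ hSF).symm
    _ = bCore ('/' :: u.toList ++ ['/']) := by rw [padJoin_mySplit]; simp
    _ = guess_set_from_url_py_alt u := (alt_eq_bCore u).symm
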